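-- pv_equiv track=rewrite | github.com/hamzaco/GRNsPRL | data_structures/Gene_Network.py | optimize_texts
-- ===== SOURCE A (Python) =====
-- def optimize_texts(text):
--     for i in range(0, len(text)):
--         temp = text[i]
--         if temp == "AND" or temp == "OR" or temp == "NOT":
--             text[i] = temp.lower()
--         if ';' in list(temp):
--             temp = temp.replace(";", "_")
--             text[i] = temp
--         if '/' in list(temp):
--             temp = temp.replace("/", "_")
--             text[i] = temp
--         if '-' in list(temp):
--             temp = temp.replace("-", "_")
--             text[i] = temp
--         if '+' in list(temp):
--             temp = temp.replace("+","plus")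
--             text[i] = temp
--         if '.' in list(temp):
--             temp = temp.replace(".","_")
--             text[i] = temp
--     return text
-- ===== SOURCE B (Python) =====
-- _SPECIALS = {';': '_', '/': '_', '-': '_', '+': 'plus', '.': '_'}
--
--
-- def optimize_texts(text):
--     for i, tok in enumerate(text):
--         if tok in ('AND', 'OR', 'NOT'):
--             text[i] = tok.lower()
--         else:
--             text[i] = ''.join(_SPECIALS.get(c, c) for c in tok)
--     return text
-- ===== Notes on version B (the rewrite author's own statement) =====
-- stated objective: idiomatic
-- what changed: Replaces the five sequential whole-string membership-test-plus-replace scans with a single character-level pass per token using a translation dict (mapping.get(c, c)) joined once; operator lowercasing moves into an if/else so each token is processed exactly once.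
import Mathlib
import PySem

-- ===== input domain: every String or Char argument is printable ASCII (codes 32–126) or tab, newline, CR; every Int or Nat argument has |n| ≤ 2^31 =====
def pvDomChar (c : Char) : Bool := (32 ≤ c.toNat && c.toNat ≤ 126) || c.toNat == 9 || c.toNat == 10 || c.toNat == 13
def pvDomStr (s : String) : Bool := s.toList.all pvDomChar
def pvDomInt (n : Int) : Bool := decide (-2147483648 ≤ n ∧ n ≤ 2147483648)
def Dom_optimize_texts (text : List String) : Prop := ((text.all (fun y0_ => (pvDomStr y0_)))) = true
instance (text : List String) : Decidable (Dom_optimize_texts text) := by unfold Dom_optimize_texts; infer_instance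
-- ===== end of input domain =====

-- B is an idiomatic rewrite: one character-level pass per token via a translation dict instead of
-- five membership-test-plus-replace whole-string scans; A mutates its argument in place, the
-- equivalence proved here is about the RETURN value only (B performs the same mutation in Python).

-- ===== PORT A =====
-- one 'if ch in list(temp): temp = temp.replace(ch, new); text[i] = temp' block of A's loop body,
-- threading the pair (temp, text[i])
def pvCondRep (st : String × String) (old new : String) : String × String :=
  if PySem.Str.isIn old st.1 then
    (PySem.Str.replace st.1 old new, PySem.Str.replace st.1 old new)
  else st

-- A's loop body for one index: the final value of text[i], given temp = text[i]
def pvStepA (temp : String) : String :=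
  let st0 : String × String :=
    (temp, if temp == "AND" || temp == "OR" || temp == "NOT" then PySem.Str.lower temp else temp)
  let st1 := pvCondRep st0 ";" "_"
  let st2 := pvCondRep st1 "/" "_"
  let st3 := pvCondRep st2 "-" "_"
  let st4 := pvCondRep st3 "+" "plus"
  let st5 := pvCondRep st4 "." "_"
  st5.2

-- for i in range(0, len(text)): temp = text[i]; ...; text[i] = ...
def optimize_texts (text : List String) : List String :=
  (PySem.List.pyRange 0 text.length 1).foldl
    (fun acc i => PySem.List.pySetD acc i (pvStepA (PySem.List.pyGetD acc i "")))
    text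

-- ===== PORT B =====
def pvSpecials : PySem.Dict Char String :=
  PySem.Dict.ofList [(';', "_"), ('/', "_"), ('-', "_"), ('+', "plus"), ('.', "_")]

def pvNormTok (tok : String) : String :=
  if tok == "AND" || tok == "OR" || tok == "NOT" then PySem.Str.lower tok
  else PySem.Str.join "" (tok.toList.map (fun c => PySem.Dict.getD pvSpecials c (String.ofList [c])))

def optimize_texts_alt (text : List String) : List String := text.map pvNormTok

-- ===== PRECONDITION & SPEC =====
def Spec_optimize_texts (text : List String) (out : List String) : Prop := out = optimize_texts_alt text
instance (text : List String) (out : List String) : Decidable (Spec_optimize_texts text out) := by unfold Spec_optimize_texts; infer_instance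

-- ===== CLAIM (what is proved, stated in full; the proofs are below) =====
def Claim_equal_optimize_texts : Prop := ∀ (text : List String), Dom_optimize_texts text → Spec_optimize_texts text (optimize_texts text)

-- ===== LEMMAS AND PROOFS =====

-- single-char replace is a per-character flatMap
theorem pvReplaceGo_singleton (o : Char) (nw : List Char) :
    ∀ (l : List Char) (fuel : Nat) (acc : List Char), l.length ≤ fuel →
      PySem.Chars.replace.go [o] nw fuel l acc
        = acc.reverse ++ l.flatMap (fun c => if c = o then nw else [c]) := by
  intro l
  induction l with
  | nil =>
      intro fuel acc _
      cases fuel <;> simp [PySem.Chars.replace.go]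
  | cons c t ih =>
      intro fuel acc hle
      cases fuel with
      | zero => simp at hle
      | succ fuel' =>
          by_cases hc : c = o
          · subst hc
            simp only [PySem.Chars.replace.go, List.isPrefixOf, BEq.rfl, Bool.and_self,
              if_pos, List.length_singleton, List.drop_one, List.tail_cons]
            rw [ih fuel' (nw.reverse ++ acc) (by simpa using Nat.succ_le_succ_iff.mp hle)]
            simp
          · have hbeq : (o == c) = false := by simp [Ne.symm hc]
            simp only [PySem.Chars.replace.go, List.isPrefixOf, hbeq, Bool.false_and, if_neg,
              Bool.false_eq_true, not_false_eq_true]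
            rw [ih fuel' (c :: acc) (by simpa using Nat.succ_le_succ_iff.mp hle)]
            simp [hc]

theorem pvReplace_singleton (s : List Char) (o : Char) (nw : List Char) :
    PySem.Chars.replace s [o] nw = s.flatMap (fun c => if c = o then nw else [c]) := by
  have := pvReplaceGo_singleton o nw s s.length [] (le_refl _)
  simpa [PySem.Chars.replace] using this

-- the conditional replace's first component always has the flatMap form
theorem pvCondRep_fst (st : String × String) (old : String) (o : Char) (nw : String)
    (h : old.toList = [o]) :
    (pvCondRep st old nw).1.toList
      = st.1.toList.flatMap (fun c => if c = o then nw.toList else [c]) := by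
  unfold pvCondRep
  split
  · simp [PySem.Str.toList_replace, h, pvReplace_singleton]
  · next hnot =>
      have hmem : o ∉ st.1.toList := by
        intro hmem
        apply hnot
        rw [PySem.Str.isIn_iff_infix, h]
        obtain ⟨a, b, he⟩ := List.mem_iff_append.mp hmem
        rw [he]
        exact ⟨a, b, by simp⟩
      rw [List.flatMap_congr (g := fun c => [c])]
      · simp
      · intro c hc
        have : c ≠ o := fun he => hmem (he ▸ hc)
        simp [this]

-- the conditional replace preserves the invariant st.2 = st.1
theorem pvCondRep_snd (st : String × String) (o nw : String) (h : st.2 = st.1) :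
    (pvCondRep st o nw).2 = (pvCondRep st o nw).1 := by
  unfold pvCondRep; split <;> simp [h]

-- joining char lists with the empty separator is flatMap
theorem pvJoin_nil (xss : List (List Char)) :
    PySem.Chars.join [] xss = xss.flatten := by
  unfold PySem.Chars.join
  unfold List.intercalate
  induction xss with
  | nil => rfl
  | cons x xs ih => cases xs <;> simp_all [List.intersperse]

-- the per-token normalisations agree
theorem pvStep_eq (s : String) : pvStepA s = pvNormTok s := by
  by_cases hA : s = "AND"
  · subst hA; decide
  by_cases hO : s = "OR"
  · subst hO; decide
  by_cases hN : s = "NOT"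
  · subst hN; decide
  have hb : (s == "AND" || s == "OR" || s == "NOT") = false := by
    simp [hA, hO, hN]
  unfold pvStepA pvNormTok
  rw [hb]
  simp only [Bool.false_eq_true, if_neg, not_false_eq_true]
  rw [pvCondRep_snd _ _ _ (pvCondRep_snd _ _ _ (pvCondRep_snd _ _ _
    (pvCondRep_snd _ _ _ (pvCondRep_snd _ _ _ rfl))))]
  apply String.toList_inj.mp
  rw [pvCondRep_fst _ "." '.' "_" (by decide),
      pvCondRep_fst _ "+" '+' "plus" (by decide),
      pvCondRep_fst _ "-" '-' "_" (by decide),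
      pvCondRep_fst _ "/" '/' "_" (by decide),
      pvCondRep_fst _ ";" ';' "_" (by decide)]
  simp only [List.flatMap_assoc]
  rw [PySem.Str.toList_join]
  simp only [String.toList_empty, List.map_map]
  rw [pvJoin_nil, List.flatMap_def.symm]
  apply List.flatMap_congr
  intro c _
  by_cases h1 : c = ';'
  · subst h1; decide
  by_cases h2 : c = '/'
  · subst h2; decide
  by_cases h3 : c = '-'
  · subst h3; decide
  by_cases h4 : c = '+'
  · subst h4; decide
  by_cases h5 : c = '.'
  · subst h5; decide
  have b1 : (';' == c) = false := by simp [Ne.symm h1]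
  have b2 : ('/' == c) = false := by simp [Ne.symm h2]
  have b3 : ('-' == c) = false := by simp [Ne.symm h3]
  have b4 : ('+' == c) = false := by simp [Ne.symm h4]
  have b5 : ('.' == c) = false := by simp [Ne.symm h5]
  simp [pvSpecials, PySem.Dict.getD, PySem.Dict.ofList, PySem.Dict.get?, PySem.Dict.empty,
    PySem.Dict.update, PySem.Dict.insert, List.find?, b1, b2, b3, b4, b5, h1, h2, h3, h4, h5]

-- the index loop writing f(text[i]) back into text[i] is List.map f
theorem pvLoop_eq (f : String → String) :
    ∀ (rest done : List String),
      (PySem.List.pyRange (done.length : Int) ((done.length : Int) + rest.length) 1).foldl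
        (fun acc i => PySem.List.pySetD acc i (f (PySem.List.pyGetD acc i ""))) (done ++ rest)
      = done ++ rest.map f := by
  intro rest
  induction rest with
  | nil => intro done; simp [PySem.List.pyRange_one_eq_nil]
  | cons x xs ih =>
      intro done
      have hlt : (done.length : Int) < (done.length : Int) + ((x :: xs).length : Int) := by
        push_cast [List.length_cons]; omega
      rw [PySem.List.pyRange_one_cons hlt]
      simp only [List.foldl_cons]
      have hget : PySem.List.pyGetD (done ++ x :: xs) (done.length : Int) "" = x := by
        simp [List.getD]
      have hset : PySem.List.pySetD (done ++ x :: xs) (done.length : Int) (f x)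
          = done ++ f x :: xs := by
        simp
      rw [hget, hset]
      have key := ih (done ++ [f x])
      simp only [List.length_append, List.length_singleton, List.append_assoc,
        List.singleton_append] at key
      push_cast [List.length_cons] at key ⊢
      rw [show (done.length : Int) + ((xs.length : Int) + 1)
            = (done.length : Int) + 1 + (xs.length : Int) by ring]
      rw [key]
      simp

-- ===== VERDICT (by name: the statement is the Claim_ definition above) =====
theorem optimize_texts_spec : Claim_equal_optimize_texts := by
  intro text _
  unfold Spec_optimize_texts optimize_texts optimize_texts_alt
  rw [show (fun (acc : List String) (i : Int) =>
        PySem.List.pySetD acc i (pvStepA (PySem.List.pyGetD acc i "")))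
      = (fun acc i => PySem.List.pySetD acc i (pvNormTok (PySem.List.pyGetD acc i ""))) by
    funext acc i; rw [pvStep_eq]]
  have := pvLoop_eq pvNormTok text []
  simpa using this
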